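-- pv_equiv track=rewrite | github.com/h3dema/command_ap | cmd/scan.py | get_subitems
-- ===== SOURCE A (Python) =====
-- def get_subitems(_l, lines):
--     r = {}
--     i = 0
--     _first = True
--     while _first or _l.find('\t\t') == 0:
--         _first = False
--         if len(_l) > 0 and _l.find('*') > 0:
--             p = _l.find('*')
--             item = _l[p + 1:].strip()
--             p = item.find(':')
--             k = item[:p].strip()
--             v = item[p + 1:].strip()
--             r.update({k: v})
--         _l = lines[i]
--         i += 1
--     # remove processed lines
--     for j in range(i):
--         lines.pop(0)
--     return r
-- ===== SOURCE B (Python) =====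
-- def get_subitems(_l, lines):
--     # boundary pass: first line that does not start with '\t\t'
--     # (raises the same IndexError as A when the list is exhausted)
--     n = 0
--     while lines[n].find('\t\t') == 0:
--         n += 1
--     # parse pass
--     r = {}
--     for s in [_l] + lines[:n]:
--         if len(s) > 0 and s.find('*') > 0:
--             p = s.find('*')
--             item = s[p + 1:].strip()
--             q = item.find(':')
--             r[item[:q].strip()] = item[q + 1:].strip()
--     # drop the n matched lines plus the terminating line
--     del lines[:n + 1]
--     return r
-- ===== Notes on version B (the rewrite author's own statement) =====
-- stated objective: simpler
-- what changed: Replaces A's interleaved read-ahead while-loop with its _first flag and manual index by two separate passes: a boundary scan that finds the first line not starting with '\t\t', then a plain parse loop over _l plus that prefix, and one del slice instead of repeated pop(0).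
import Mathlib
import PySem

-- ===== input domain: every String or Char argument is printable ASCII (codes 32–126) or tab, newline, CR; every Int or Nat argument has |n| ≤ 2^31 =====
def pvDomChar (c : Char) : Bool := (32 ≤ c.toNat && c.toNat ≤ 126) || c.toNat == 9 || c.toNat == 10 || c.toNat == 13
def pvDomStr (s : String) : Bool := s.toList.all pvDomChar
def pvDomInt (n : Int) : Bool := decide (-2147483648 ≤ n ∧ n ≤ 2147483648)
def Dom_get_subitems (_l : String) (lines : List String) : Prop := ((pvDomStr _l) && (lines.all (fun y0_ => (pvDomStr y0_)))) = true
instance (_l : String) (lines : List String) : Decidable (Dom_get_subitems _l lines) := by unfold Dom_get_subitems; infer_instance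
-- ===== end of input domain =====

-- B replaces A's interleaved read-ahead while-loop (with its `_first` flag) by a boundary-scan
-- pass followed by a separate parse pass over the matched prefix (objective: simpler decomposition;
-- both Pythons mutate `lines` identically, the equivalence proved here is about the return value).

-- ===== PORT A =====
-- per-line body of A's loop: if len(_l) > 0 and _l.find('*') > 0: … r.update({k: v})
def pvParseLine (r : PySem.Dict String String) (s : String) : PySem.Dict String String :=
  if PySem.Str.len s > 0 ∧ PySem.Str.find s "*" > 0 then
    let p := PySem.Str.find s "*"
    let item := PySem.Str.strip (PySem.Str.slice s (some (p + 1)) none)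
    let q := PySem.Str.find item ":"
    let k := PySem.Str.strip (PySem.Str.slice item none (some q))
    let v := PySem.Str.strip (PySem.Str.slice item (some (q + 1)) none)
    r.insert k v
  else r

-- A's while-loop: parse the current _l, then _l := lines[i]; continue while the new _l starts
-- with '\t\t'.  Recursion is over the not-yet-read suffix of lines; the [] case is where Python
-- raises IndexError (excluded by Pre_), the accumulated dict is returned there as a dummy.
def pvLoopA (r : PySem.Dict String String) (l : String) : List String → PySem.Dict String String
  | [] => pvParseLine r l
  | x :: xs =>
      let r' := pvParseLine r l
      if PySem.Str.find x "\t\t" = 0 then pvLoopA r' x xs else r'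

def get_subitems (_l : String) (lines : List String) : List (String × String) :=
  (pvLoopA PySem.Dict.empty _l lines).items

-- ===== PORT B =====
-- boundary pass: index of the first line whose find('\t\t') != 0 (list exhausted = IndexError,
-- excluded by Pre_; 0 returned there as a dummy)
def pvBoundary : List String → Nat
  | [] => 0
  | x :: xs => if PySem.Str.find x "\t\t" = 0 then pvBoundary xs + 1 else 0

def get_subitems_alt (_l : String) (lines : List String) : List (String × String) :=
  let n := pvBoundary lines
  (((_l :: lines.take n).foldl pvParseLine PySem.Dict.empty)).items

-- ===== PRECONDITION & SPEC =====
-- Pre_ excludes exactly the inputs where both Pythons raise IndexError: every line of `lines`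
-- starts with '\t\t' (including lines = []), so the terminating read past the end is reached.
def Pre_get_subitems (_l : String) (lines : List String) : Prop :=
  ∃ s ∈ lines, PySem.Str.find s "\t\t" ≠ 0
instance (_l : String) (lines : List String) : Decidable (Pre_get_subitems _l lines) := by unfold Pre_get_subitems; infer_instance

def pvWitness_get_subitems : String × List String :=
  ("\t\t* mode : master", ["\t\t* ssid : test", "wlan0"])

def Spec_get_subitems (_l : String) (lines : List String) (out : List (String × String)) : Prop := out = get_subitems_alt _l lines
instance (_l : String) (lines : List String) (out : List (String × String)) : Decidable (Spec_get_subitems _l lines out) := by unfold Spec_get_subitems; infer_instance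

-- ===== CLAIM (what is proved, stated in full; the proofs are below) =====
def Claim_equal_get_subitems : Prop := ∀ (_l : String) (lines : List String), Dom_get_subitems _l lines → Pre_get_subitems _l lines → Spec_get_subitems _l lines (get_subitems _l lines)

-- ===== LEMMAS AND PROOFS =====

-- A's interleaved loop equals the fold of the parse body over _l followed by the prefix of
-- lines below the boundary (this holds for every input, Pre_ or not).
theorem pvLoopA_eq_foldl (lines : List String) :
    ∀ (r : PySem.Dict String String) (l : String),
      pvLoopA r l lines = (l :: lines.take (pvBoundary lines)).foldl pvParseLine r := by
  induction lines with
  | nil => intro r l; simp [pvLoopA, pvBoundary]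
  | cons x xs ih =>
      intro r l
      simp only [pvLoopA, pvBoundary]
      by_cases h : PySem.Str.find x "\t\t" = 0
      · rw [if_pos h, if_pos h, ih]
        simp [List.foldl]
      · rw [if_neg h, if_neg h]
        simp [List.foldl]

-- ===== VERDICT (by name: the statement is the Claim_ definition above) =====
theorem get_subitems_spec : Claim_equal_get_subitems := by
  intro _l lines _ _
  unfold Spec_get_subitems get_subitems get_subitems_alt
  rw [pvLoopA_eq_foldl]
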